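-- pv_equiv track=rewrite | github.com/antoniogomezgallardo/1x2_Predictor | backend/app/ml/enhanced_predictor.py | _identify_data_sources
-- ===== SOURCE A (Python) =====
-- from typing import List, Dict, Any, Tuple, Optional
--
-- def _identify_data_sources(features: Dict[str, float]) -> List[str]:
--     """Identify which data sources contributed to the features"""
--     sources = set()
--
--     if any('xg_' in key for key in features.keys()):
--         sources.add("Expected Goals (xG)")
--     if any('xa_' in key for key in features.keys()):
--         sources.add("Expected Assists (xA)")
--     if any('xt_' in key for key in features.keys()):
--         sources.add("Expected Threat (xT)")
--     if any('ppda_' in key for key in features.keys()):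
--         sources.add("Pressing (PPDA)")
--     if any('market_' in key for key in features.keys()):
--         sources.add("Market Intelligence")
--     if any(key in ['temperature', 'weather_impact_score', 'rivalry_intensity'] for key in features.keys()):
--         sources.add("External Factors")
--     if any('points' in key or 'goals' in key for key in features.keys()):
--         sources.add("Basic Statistics")
--
--     return sorted(list(sources))
-- ===== SOURCE B (Python) =====
-- def _identify_data_sources(features):
--     """Identify which data sources contributed to the features"""
--     f_basic = f_xa = f_xg = f_xt = f_ext = f_mkt = f_ppda = False
--     for key in features.keys():
--         if 'points' in key or 'goals' in key:
--             f_basic = True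
--         if 'xa_' in key:
--             f_xa = True
--         if 'xg_' in key:
--             f_xg = True
--         if 'xt_' in key:
--             f_xt = True
--         if key in ['temperature', 'weather_impact_score', 'rivalry_intensity']:
--             f_ext = True
--         if 'market_' in key:
--             f_mkt = True
--         if 'ppda_' in key:
--             f_ppda = True
--     out = []
--     if f_basic:
--         out.append("Basic Statistics")
--     if f_xa:
--         out.append("Expected Assists (xA)")
--     if f_xg:
--         out.append("Expected Goals (xG)")
--     if f_xt:
--         out.append("Expected Threat (xT)")
--     if f_ext:
--         out.append("External Factors")
--     if f_mkt:
--         out.append("Market Intelligence")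
--     if f_ppda:
--         out.append("Pressing (PPDA)")
--     return out
-- ===== Notes on version B (the rewrite author's own statement) =====
-- stated objective: alternative
-- what changed: A makes seven separate any()-scans over the keys, builds a set and sorts it; B makes a single pass over the keys setting seven flags and then emits the matching labels directly in alphabetical order, with no set and no sort call.
import Mathlib
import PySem

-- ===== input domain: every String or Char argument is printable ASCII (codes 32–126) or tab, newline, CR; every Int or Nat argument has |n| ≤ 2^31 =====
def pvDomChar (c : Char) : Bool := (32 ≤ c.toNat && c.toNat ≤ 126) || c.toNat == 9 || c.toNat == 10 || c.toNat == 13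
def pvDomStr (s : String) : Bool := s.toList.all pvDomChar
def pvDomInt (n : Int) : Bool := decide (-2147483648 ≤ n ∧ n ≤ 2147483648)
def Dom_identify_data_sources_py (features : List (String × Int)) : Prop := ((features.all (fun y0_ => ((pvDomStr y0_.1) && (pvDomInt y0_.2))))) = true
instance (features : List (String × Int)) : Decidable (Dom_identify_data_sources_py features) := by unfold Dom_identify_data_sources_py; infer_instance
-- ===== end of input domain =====

-- B replaces A's seven separate any()-scans over the keys by ONE pass setting seven flags,
-- then emits the labels directly in alphabetical order with no sort call (objective: alternative).


-- ===== PORT A =====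
def identify_data_sources_py (features : List (String × Int)) : List String :=
  let keys := features.map (·.1)
  let sources : PySem.Set String := PySem.Set.empty
  let sources := if keys.any (fun k => PySem.Str.isIn "xg_" k) then PySem.Set.add sources "Expected Goals (xG)" else sources
  let sources := if keys.any (fun k => PySem.Str.isIn "xa_" k) then PySem.Set.add sources "Expected Assists (xA)" else sources
  let sources := if keys.any (fun k => PySem.Str.isIn "xt_" k) then PySem.Set.add sources "Expected Threat (xT)" else sources
  let sources := if keys.any (fun k => PySem.Str.isIn "ppda_" k) then PySem.Set.add sources "Pressing (PPDA)" else sources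
  let sources := if keys.any (fun k => PySem.Str.isIn "market_" k) then PySem.Set.add sources "Market Intelligence" else sources
  let sources := if keys.any (fun k => (["temperature", "weather_impact_score", "rivalry_intensity"] : List String).contains k) then PySem.Set.add sources "External Factors" else sources
  let sources := if keys.any (fun k => PySem.Str.isIn "points" k || PySem.Str.isIn "goals" k) then PySem.Set.add sources "Basic Statistics" else sources
  PySem.List.sorted sources (fun x => x) false

-- ===== PORT B =====
-- one pass over the keys, accumulating seven flags
def identify_data_sources_py_alt (features : List (String × Int)) : List String :=
  let flags := (features.map (·.1)).foldl
    (fun (f : Bool × Bool × Bool × Bool × Bool × Bool × Bool) k =>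
      (f.1 || (PySem.Str.isIn "points" k || PySem.Str.isIn "goals" k),
       f.2.1 || PySem.Str.isIn "xa_" k,
       f.2.2.1 || PySem.Str.isIn "xg_" k,
       f.2.2.2.1 || PySem.Str.isIn "xt_" k,
       f.2.2.2.2.1 || (["temperature", "weather_impact_score", "rivalry_intensity"] : List String).contains k,
       f.2.2.2.2.2.1 || PySem.Str.isIn "market_" k,
       f.2.2.2.2.2.2 || PySem.Str.isIn "ppda_" k))
    (false, false, false, false, false, false, false)
  (if flags.1 then ["Basic Statistics"] else []) ++
  (if flags.2.1 then ["Expected Assists (xA)"] else []) ++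
  (if flags.2.2.1 then ["Expected Goals (xG)"] else []) ++
  (if flags.2.2.2.1 then ["Expected Threat (xT)"] else []) ++
  (if flags.2.2.2.2.1 then ["External Factors"] else []) ++
  (if flags.2.2.2.2.2.1 then ["Market Intelligence"] else []) ++
  (if flags.2.2.2.2.2.2 then ["Pressing (PPDA)"] else [])

-- ===== PRECONDITION & SPEC =====
def Spec_identify_data_sources_py (features : List (String × Int)) (out : List String) : Prop := out = identify_data_sources_py_alt features
instance (features : List (String × Int)) (out : List String) : Decidable (Spec_identify_data_sources_py features out) := by unfold Spec_identify_data_sources_py; infer_instance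

-- ===== CLAIM (what is proved, stated in full; the proofs are below) =====
def Claim_equal_identify_data_sources_py : Prop := ∀ (features : List (String × Int)), Dom_identify_data_sources_py features → Spec_identify_data_sources_py features (identify_data_sources_py features)

-- ===== LEMMAS AND PROOFS =====

-- B's one-pass fold computes exactly the seven `any` booleans
theorem flags_foldl (keys : List String)
    (f0 : Bool × Bool × Bool × Bool × Bool × Bool × Bool) :
    keys.foldl
      (fun (f : Bool × Bool × Bool × Bool × Bool × Bool × Bool) k =>
        (f.1 || (PySem.Str.isIn "points" k || PySem.Str.isIn "goals" k),
         f.2.1 || PySem.Str.isIn "xa_" k,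
         f.2.2.1 || PySem.Str.isIn "xg_" k,
         f.2.2.2.1 || PySem.Str.isIn "xt_" k,
         f.2.2.2.2.1 || (["temperature", "weather_impact_score", "rivalry_intensity"] : List String).contains k,
         f.2.2.2.2.2.1 || PySem.Str.isIn "market_" k,
         f.2.2.2.2.2.2 || PySem.Str.isIn "ppda_" k)) f0
    = (f0.1 || keys.any (fun k => PySem.Str.isIn "points" k || PySem.Str.isIn "goals" k),
       f0.2.1 || keys.any (fun k => PySem.Str.isIn "xa_" k),
       f0.2.2.1 || keys.any (fun k => PySem.Str.isIn "xg_" k),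
       f0.2.2.2.1 || keys.any (fun k => PySem.Str.isIn "xt_" k),
       f0.2.2.2.2.1 || keys.any (fun k => (["temperature", "weather_impact_score", "rivalry_intensity"] : List String).contains k),
       f0.2.2.2.2.2.1 || keys.any (fun k => PySem.Str.isIn "market_" k),
       f0.2.2.2.2.2.2 || keys.any (fun k => PySem.Str.isIn "ppda_" k)) := by
  induction keys generalizing f0 with
  | nil => simp
  | cons k t ih =>
    simp only [List.foldl_cons, List.any_cons, ih]
    simp [Bool.or_assoc]

-- ===== VERDICT (by name: the statement is the Claim_ definition above) =====
theorem identify_data_sources_py_spec : Claim_equal_identify_data_sources_py := by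
  intro features _
  unfold Spec_identify_data_sources_py identify_data_sources_py identify_data_sources_py_alt
  rw [flags_foldl]
  simp only [Bool.false_or]
  generalize (features.map (·.1)).any (fun k => PySem.Str.isIn "xg_" k) = b1
  generalize (features.map (·.1)).any (fun k => PySem.Str.isIn "xa_" k) = b2
  generalize (features.map (·.1)).any (fun k => PySem.Str.isIn "xt_" k) = b3
  generalize (features.map (·.1)).any (fun k => PySem.Str.isIn "ppda_" k) = b4
  generalize (features.map (·.1)).any (fun k => PySem.Str.isIn "market_" k) = b5
  generalize (features.map (·.1)).any (fun k => (["temperature", "weather_impact_score", "rivalry_intensity"] : List String).contains k) = b6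
  generalize (features.map (·.1)).any (fun k => PySem.Str.isIn "points" k || PySem.Str.isIn "goals" k) = b7
  rcases b1 <;> rcases b2 <;> rcases b3 <;> rcases b4 <;> rcases b5 <;> rcases b6 <;> rcases b7 <;>
    simp [PySem.Set.add, PySem.Set.empty, PySem.Set.contains, PySem.List.sorted, PySem.List.insertBy] <;>
    decide
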